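-- pv_equiv track=rewrite | github.com/jesuprofun/profun | qube_cinemas/indexing.py | indexing
-- ===== SOURCE A (Python) =====
-- def indexing(index, lyst, file_name):
--
--
--     count = 1
--
--     for word in lyst:
--         if word not in index:
--             index[word] = {}
--             index[word][file_name] = count
--         elif file_name not in index[word]:
--             index[word][file_name] = count
--         else:
--             index[word][file_name] += 1
--
--     return index
-- ===== SOURCE B (Python) =====
-- def indexing(index, lyst, file_name):
--     counts = {}
--     for word in lyst:
--         counts[word] = counts.get(word, 0) + 1
--     for word, n in counts.items():
--         inner = index.setdefault(word, {})
--         if file_name in inner: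
--             inner[file_name] += n
--         else:
--             inner[file_name] = n
--     return index
-- ===== Notes on version B (the rewrite author's own statement) =====
-- stated objective: alternative
-- what changed: B first aggregates lyst into a word-frequency table in one pass, then merges each (word, n) pair into index once (add n, or start at n), instead of A's per-occurrence incremental update of the nested dict; return value is identical and both mutate index in place.
import Mathlib
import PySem

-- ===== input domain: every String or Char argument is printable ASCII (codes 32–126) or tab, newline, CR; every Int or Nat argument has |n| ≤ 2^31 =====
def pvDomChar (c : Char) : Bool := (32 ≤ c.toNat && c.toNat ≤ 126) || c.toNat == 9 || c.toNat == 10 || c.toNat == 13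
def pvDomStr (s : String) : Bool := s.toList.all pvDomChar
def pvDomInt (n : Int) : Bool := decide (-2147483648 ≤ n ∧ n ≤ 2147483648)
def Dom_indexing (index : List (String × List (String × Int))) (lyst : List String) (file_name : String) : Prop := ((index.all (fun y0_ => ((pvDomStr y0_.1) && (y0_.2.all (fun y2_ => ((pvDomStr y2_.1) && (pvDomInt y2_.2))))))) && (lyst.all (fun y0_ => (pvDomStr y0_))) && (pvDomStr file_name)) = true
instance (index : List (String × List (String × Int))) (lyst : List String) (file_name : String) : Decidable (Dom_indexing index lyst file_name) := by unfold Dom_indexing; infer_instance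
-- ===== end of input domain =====

-- B aggregates lyst into a word-frequency table first and then merges each (word, n) pair once,
-- instead of A's per-occurrence nested-dict update; same return value (both Pythons also
-- mutate `index` in place identically — the equivalence proved here is about the return value).

-- shared glue: the Python nested dict as a PySem.Dict of PySem.Dicts, and back
def pvToDict (index : List (String × List (String × Int))) : PySem.Dict String (PySem.Dict String Int) :=
  PySem.Dict.mk (index.map (fun p => (p.1, PySem.Dict.mk p.2)))
def pvOfDict (d : PySem.Dict String (PySem.Dict String Int)) : List (String × List (String × Int)) :=
  d.items.map (fun p => (p.1, p.2.items))

-- ===== PORT A =====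
-- one iteration of A's loop body (count = 1 throughout A); each `index[word]` is a lookup
def pvAStep (file_name : String) (d : PySem.Dict String (PySem.Dict String Int)) (word : String) :
    PySem.Dict String (PySem.Dict String Int) :=
  if d.contains word = false then
    -- index[word] = {}; index[word][file_name] = count
    (d.insert word PySem.Dict.empty).insert word
      (((d.insert word PySem.Dict.empty).getD word PySem.Dict.empty).insert file_name 1)
  else if (d.getD word PySem.Dict.empty).contains file_name = false then
    d.insert word ((d.getD word PySem.Dict.empty).insert file_name 1)
  else
    d.insert word ((d.getD word PySem.Dict.empty).modify file_name 0 (· + 1))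

def indexing (index : List (String × List (String × Int))) (lyst : List String) (file_name : String) :
    List (String × List (String × Int)) :=
  pvOfDict (lyst.foldl (pvAStep file_name) (pvToDict index))

-- ===== PORT B =====
-- merge one (word, n) pair of the frequency table into index (inner = index.setdefault(word, {}))
def pvBStep (file_name : String) (d : PySem.Dict String (PySem.Dict String Int)) (p : String × Int) :
    PySem.Dict String (PySem.Dict String Int) :=
  if ((d.setdefault p.1 PySem.Dict.empty).getD p.1 PySem.Dict.empty).contains file_name = true then
    (d.setdefault p.1 PySem.Dict.empty).insert p.1
      (((d.setdefault p.1 PySem.Dict.empty).getD p.1 PySem.Dict.empty).modify file_name 0 (· + p.2))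
  else
    (d.setdefault p.1 PySem.Dict.empty).insert p.1
      (((d.setdefault p.1 PySem.Dict.empty).getD p.1 PySem.Dict.empty).insert file_name p.2)

def indexing_alt (index : List (String × List (String × Int))) (lyst : List String) (file_name : String) :
    List (String × List (String × Int)) :=
  let counts := lyst.foldl (fun c w => c.insert w (c.getD w 0 + 1)) PySem.Dict.empty
  pvOfDict (counts.items.foldl (pvBStep file_name) (pvToDict index))

-- ===== PRECONDITION & SPEC =====
def Spec_indexing (index : List (String × List (String × Int))) (lyst : List String) (file_name : String) (out : List (String × List (String × Int))) : Prop := out = indexing_alt index lyst file_name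
instance (index : List (String × List (String × Int))) (lyst : List String) (file_name : String) (out : List (String × List (String × Int))) : Decidable (Spec_indexing index lyst file_name out) := by unfold Spec_indexing; infer_instance

-- ===== CLAIM (what is proved, stated in full; the proofs are below) =====
def Claim_equal_indexing : Prop := ∀ (index : List (String × List (String × Int))) (lyst : List String) (file_name : String), Dom_indexing index lyst file_name → Spec_indexing index lyst file_name (indexing index lyst file_name)

-- ===== LEMMAS AND PROOFS =====

-- merging a word with count 1 is exactly one iteration of A's loop
theorem pv_bstep_one (fn : String) (d : PySem.Dict String (PySem.Dict String Int)) (w : String) :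
    pvBStep fn d (w, 1) = pvAStep fn d w := by
  simp only [pvBStep, pvAStep]
  by_cases hc : d.contains w = true
  · rw [PySem.Dict.setdefault_of_contains d PySem.Dict.empty hc]
    by_cases hf : (d.getD w PySem.Dict.empty).contains fn = true
    · simp [hc, hf]
    · simp only [Bool.not_eq_true] at hf
      simp [hc, hf]
  · simp only [Bool.not_eq_true] at hc
    rw [PySem.Dict.setdefault_of_not_contains d PySem.Dict.empty hc]
    simp [hc, PySem.Dict.getD_insert_self, PySem.Dict.contains_empty]

-- after merging (w, n), w is present and its inner dict contains fn
theorem pv_bstep_present (fn : String) (d : PySem.Dict String (PySem.Dict String Int)) (w : String) (n : Int) :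
    (pvBStep fn d (w, n)).contains w = true ∧
      ((pvBStep fn d (w, n)).getD w PySem.Dict.empty).contains fn = true := by
  simp only [pvBStep]
  split_ifs with hf
  · refine ⟨PySem.Dict.contains_insert_self _ _ _, ?_⟩
    rw [PySem.Dict.getD_insert_self]
    unfold PySem.Dict.modify
    exact PySem.Dict.contains_insert_self _ _ _
  · refine ⟨PySem.Dict.contains_insert_self _ _ _, ?_⟩
    rw [PySem.Dict.getD_insert_self]
    exact PySem.Dict.contains_insert_self _ _ _

-- merging (w, n+1) = merging (w, n) then one more iteration of A's loop on w
theorem pv_bstep_succ (fn : String) (d : PySem.Dict String (PySem.Dict String Int)) (w : String) (n : Int) :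
    pvBStep fn d (w, n + 1) = pvAStep fn (pvBStep fn d (w, n)) w := by
  have key : ∀ (d' : PySem.Dict String (PySem.Dict String Int)) (i : PySem.Dict String Int) (m : Int),
      pvAStep fn (d'.insert w (i.insert fn m)) w = d'.insert w (i.insert fn (m + 1)) := by
    intro d' i m
    simp [pvAStep, PySem.Dict.contains_insert_self, PySem.Dict.getD_insert_self,
          PySem.Dict.modify, PySem.Dict.insert_insert_self]
  by_cases hc : d.contains w = true
  · have hsd := PySem.Dict.setdefault_of_contains d (k := w) PySem.Dict.empty hc
    by_cases hf : (d.getD w PySem.Dict.empty).contains fn = true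
    · simp only [pvBStep, hsd, hf, if_true, PySem.Dict.modify]
      rw [key, ← Int.add_assoc]
    · simp only [Bool.not_eq_true] at hf
      simp only [pvBStep, hsd, hf, Bool.false_eq_true, if_false]
      rw [key]
  · simp only [Bool.not_eq_true] at hc
    have hsd := PySem.Dict.setdefault_of_not_contains d (k := w) PySem.Dict.empty hc
    simp only [pvBStep, hsd, PySem.Dict.getD_insert_self, PySem.Dict.contains_empty,
               Bool.false_eq_true, if_false]
    rw [key]

-- inserts at distinct keys commute when the first key is already present
theorem pv_insert_comm {ν : Type} (d : PySem.Dict String ν) (k1 k2 : String) (v1 v2 : ν)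
    (h1 : d.contains k1 = true) (hne : k1 ≠ k2) :
    (d.insert k1 v1).insert k2 v2 = (d.insert k2 v2).insert k1 v1 := by
  have h12 : (k1 == k2) = false := by simp [hne]
  have h21 : (k2 == k1) = false := by simp [Ne.symm hne]
  apply PySem.Dict.ext
  by_cases h2 : d.contains k2 = true
  · have c1 : (d.insert k1 v1).contains k2 = true := by
      simp [PySem.Dict.contains_insert, h21, h2]
    have c2 : (d.insert k2 v2).contains k1 = true := by
      simp [PySem.Dict.contains_insert, h12, h1]
    rw [PySem.Dict.items_insert_of_contains _ _ c1, PySem.Dict.items_insert_of_contains _ _ h1,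
        PySem.Dict.items_insert_of_contains _ _ c2, PySem.Dict.items_insert_of_contains _ _ h2,
        List.map_map, List.map_map]
    apply List.map_congr_left
    intro p _
    simp only [Function.comp_apply]
    by_cases e1 : (p.1 == k1) = true
    · have hp : p.1 = k1 := by simpa using e1
      simp [hp, h12]
    · by_cases e2 : (p.1 == k2) = true
      · have hp : p.1 = k2 := by simpa using e2
        simp [hp, h21]
      · simp only [Bool.not_eq_true] at e1 e2
        simp [e1, e2]
  · simp only [Bool.not_eq_true] at h2
    have c1 : (d.insert k1 v1).contains k2 = false := by
      simp [PySem.Dict.contains_insert, h21, h2]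
    have c2 : (d.insert k2 v2).contains k1 = true := by
      simp [PySem.Dict.contains_insert, h12, h1]
    rw [PySem.Dict.items_insert_of_not_contains _ _ c1, PySem.Dict.items_insert_of_contains _ _ h1,
        PySem.Dict.items_insert_of_contains _ _ c2, PySem.Dict.items_insert_of_not_contains _ _ h2,
        List.map_append]
    simp only [List.map_cons, List.map_nil, h21, Bool.false_eq_true, if_false]

-- merging a pair with a different key does not change what is stored at w
theorem pv_bstep_lookup (fn : String) (d : PySem.Dict String (PySem.Dict String Int))
    (p : String × Int) (w : String) (hne : p.1 ≠ w) :
    (pvBStep fn d p).contains w = d.contains w ∧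
      (pvBStep fn d p).getD w PySem.Dict.empty = d.getD w PySem.Dict.empty := by
  have hne2 : w ≠ p.1 := Ne.symm hne
  simp only [pvBStep]
  constructor
  · split_ifs <;>
      simp [PySem.Dict.contains_insert, PySem.Dict.contains_setdefault, hne2]
  · split_ifs <;>
      rw [PySem.Dict.getD_eq_get?_getD, PySem.Dict.get?_insert_of_ne _ _ hne2,
          PySem.Dict.get?_setdefault_of_ne _ _ hne2, ← PySem.Dict.getD_eq_get?_getD]

theorem pv_astep_of_present (fn : String) (d : PySem.Dict String (PySem.Dict String Int)) (w : String)
    (h1 : d.contains w = true) (h2 : (d.getD w PySem.Dict.empty).contains fn = true) :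
    pvAStep fn d w = d.insert w ((d.getD w PySem.Dict.empty).modify fn 0 (· + 1)) := by
  simp [pvAStep, h1, h2]

-- one A-iteration on w (present, fn present) commutes with merging a pair with another key
theorem pv_bstep_astep_comm (fn : String) (d : PySem.Dict String (PySem.Dict String Int))
    (w : String) (p : String × Int) (hne : p.1 ≠ w)
    (h1 : d.contains w = true) (h2 : (d.getD w PySem.Dict.empty).contains fn = true) :
    pvBStep fn (pvAStep fn d w) p = pvAStep fn (pvBStep fn d p) w := by
  have hne2 : w ≠ p.1 := Ne.symm hne
  have hM : ∀ V, pvAStep fn (d.insert p.1 V) w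
      = (d.insert p.1 V).insert w ((d.getD w PySem.Dict.empty).modify fn 0 (· + 1)) := by
    intro V
    have hcw : (d.insert p.1 V).contains w = true := by
      simp [PySem.Dict.contains_insert, h1]
    have hgw : (d.insert p.1 V).getD w PySem.Dict.empty = d.getD w PySem.Dict.empty := by
      rw [PySem.Dict.getD_eq_get?_getD, PySem.Dict.get?_insert_of_ne _ _ hne2,
          ← PySem.Dict.getD_eq_get?_getD]
    rw [pv_astep_of_present fn _ w hcw (by rw [hgw]; exact h2), hgw]
  rw [pv_astep_of_present fn d w h1 h2]
  have hcp : ∀ M : PySem.Dict String Int,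
      (d.insert w M).contains p.1 = d.contains p.1 := by
    intro M; simp [PySem.Dict.contains_insert, hne]
  have hgp : ∀ M : PySem.Dict String Int,
      (d.insert w M).getD p.1 PySem.Dict.empty = d.getD p.1 PySem.Dict.empty := by
    intro M
    rw [PySem.Dict.getD_eq_get?_getD, PySem.Dict.get?_insert_of_ne _ _ hne,
        ← PySem.Dict.getD_eq_get?_getD]
  by_cases hc : d.contains p.1 = true
  · have s1 := PySem.Dict.setdefault_of_contains
      (d.insert w ((d.getD w PySem.Dict.empty).modify fn 0 (· + 1))) (k := p.1)
      PySem.Dict.empty (by rw [hcp]; exact hc)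
    have s2 := PySem.Dict.setdefault_of_contains d (k := p.1) PySem.Dict.empty hc
    simp only [pvBStep, s1, s2, hgp]
    split_ifs with hf
    · rw [hM]; exact pv_insert_comm d w p.1 _ _ h1 hne2
    · rw [hM]; exact pv_insert_comm d w p.1 _ _ h1 hne2
  · simp only [Bool.not_eq_true] at hc
    have s1 := PySem.Dict.setdefault_of_not_contains
      (d.insert w ((d.getD w PySem.Dict.empty).modify fn 0 (· + 1))) (k := p.1)
      PySem.Dict.empty (by rw [hcp]; exact hc)
    have s2 := PySem.Dict.setdefault_of_not_contains d (k := p.1) PySem.Dict.empty hc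
    simp only [pvBStep, s1, s2, PySem.Dict.getD_insert_self, PySem.Dict.contains_empty,
               Bool.false_eq_true, if_false, PySem.Dict.insert_insert_self]
    rw [hM]
    exact pv_insert_comm d w p.1 _ _ h1 hne2

theorem pv_foldl_bstep_astep_comm (fn : String) (w : String) (c2 : List (String × Int)) :
    ∀ d : PySem.Dict String (PySem.Dict String Int), (∀ p ∈ c2, p.1 ≠ w) →
      d.contains w = true → (d.getD w PySem.Dict.empty).contains fn = true →
      c2.foldl (pvBStep fn) (pvAStep fn d w) = pvAStep fn (c2.foldl (pvBStep fn) d) w := by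
  induction c2 with
  | nil => intro d _ _ _; rfl
  | cons p t ih =>
    intro d hall h1 h2
    simp only [List.foldl_cons]
    rw [pv_bstep_astep_comm fn d w p (hall p List.mem_cons_self) h1 h2]
    obtain ⟨hcw, hgw⟩ := pv_bstep_lookup fn d p w (hall p List.mem_cons_self)
    exact ih (pvBStep fn d p) (fun q hq => hall q (List.mem_cons_of_mem _ hq))
      (by rw [hcw]; exact h1) (by rw [hgw]; exact h2)

theorem pv_contains_mk_cons (w : String) (q : String × Int) (t : List (String × Int)) :
    (PySem.Dict.mk (q :: t)).contains w = ((q.1 == w) || (PySem.Dict.mk t).contains w) := by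
  simp [PySem.Dict.contains]

theorem pv_getD_mk_cons (w : String) (q : String × Int) (t : List (String × Int))
    (h : (q.1 == w) = false) :
    (PySem.Dict.mk (q :: t)).getD w 0 = (PySem.Dict.mk t).getD w 0 := by
  simp [PySem.Dict.getD, PySem.Dict.get?, h]

theorem pv_insert_mk_cons (w : String) (u : Int) (q : String × Int) (t : List (String × Int))
    (h : (q.1 == w) = false) :
    ((PySem.Dict.mk (q :: t)).insert w u).items = q :: ((PySem.Dict.mk t).insert w u).items := by
  by_cases hct : (PySem.Dict.mk t).contains w = true
  · have hc : (PySem.Dict.mk (q :: t)).contains w = true := by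
      rw [pv_contains_mk_cons, h, hct]; rfl
    rw [PySem.Dict.items_insert_of_contains _ _ hc, PySem.Dict.items_insert_of_contains _ _ hct]
    simp only [List.map_cons, h, Bool.false_eq_true, if_false]
  · simp only [Bool.not_eq_true] at hct
    have hc : (PySem.Dict.mk (q :: t)).contains w = false := by
      rw [pv_contains_mk_cons, h, hct]; rfl
    rw [PySem.Dict.items_insert_of_not_contains _ _ hc,
        PySem.Dict.items_insert_of_not_contains _ _ hct]
    rfl

-- bumping w's count in the frequency table, then merging, = merging then one A-iteration on w
theorem pv_merge_insert (fn : String) (w : String) :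
    ∀ (l : List (String × Int)) (d : PySem.Dict String (PySem.Dict String Int)),
      (l.map Prod.fst).Nodup →
      (((PySem.Dict.mk l).insert w ((PySem.Dict.mk l).getD w 0 + 1)).items).foldl (pvBStep fn) d
        = pvAStep fn (l.foldl (pvBStep fn) d) w := by
  intro l
  induction l with
  | nil =>
    intro d _
    have h0 : ((PySem.Dict.mk ([] : List (String × Int))).insert w
        ((PySem.Dict.mk ([] : List (String × Int))).getD w 0 + 1)).items = [(w, 1)] := by
      simp [PySem.Dict.insert, PySem.Dict.contains, PySem.Dict.getD, PySem.Dict.get?]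
    rw [h0]
    simp only [List.foldl_cons, List.foldl_nil]
    exact pv_bstep_one fn d w
  | cons q t ih =>
    intro d hnd
    obtain ⟨k, v⟩ := q
    simp only [List.map_cons, List.nodup_cons] at hnd
    obtain ⟨hq, hndt⟩ := hnd
    by_cases hkw : k = w
    · subst hkw
      have hc : (PySem.Dict.mk ((k, v) :: t)).contains k = true := by
        rw [pv_contains_mk_cons]; simp
      have hget : (PySem.Dict.mk ((k, v) :: t)).getD k 0 = v := by
        simp [PySem.Dict.getD, PySem.Dict.get?]
      rw [hget, PySem.Dict.items_insert_of_contains _ _ hc]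
      have hmap : List.map (fun p => if (p.1 == k) = true then (k, v + 1) else p) ((k, v) :: t)
          = (k, v + 1) :: t := by
        simp only [List.map_cons]
        have e1 : (((k, v) : String × Int).1 == k) = true := by simp
        rw [e1]
        simp only [if_true]
        congr 1
        have hid : ∀ p ∈ t, (fun p : String × Int =>
            if (p.1 == k) = true then (k, v + 1) else p) p = p := by
          intro p hp
          have hpk : p.1 ≠ k := by
            intro e
            exact hq (by rw [← e]; exact List.mem_map_of_mem hp)
          simp [hpk]
        rw [List.map_congr_left hid]
        simp
      rw [hmap]
      simp only [List.foldl_cons]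
      rw [pv_bstep_succ]
      have pres := pv_bstep_present fn d k v
      rw [pv_foldl_bstep_astep_comm fn k t (pvBStep fn d (k, v))
            (fun p hp => fun e => hq (by rw [← e]; exact List.mem_map_of_mem hp))
            pres.1 pres.2]
    · have hqw : ((k : String) == w) = false := by simp [hkw]
      rw [pv_getD_mk_cons w (k, v) t hqw, pv_insert_mk_cons w _ (k, v) t hqw]
      simp only [List.foldl_cons]
      exact ih (pvBStep fn d (k, v)) hndt

theorem pv_main_fold (fn : String) (lyst : List String) :
    ∀ (c : PySem.Dict String Int) (d : PySem.Dict String (PySem.Dict String Int)), c.keys.Nodup →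
      ((lyst.foldl (fun c w => c.insert w (c.getD w 0 + 1)) c).items).foldl (pvBStep fn) d
        = lyst.foldl (pvAStep fn) (c.items.foldl (pvBStep fn) d) := by
  induction lyst with
  | nil => intro c d _; rfl
  | cons w t ih =>
    intro c d hnd
    simp only [List.foldl_cons]
    rw [ih (c.insert w (c.getD w 0 + 1)) d (PySem.Dict.nodup_keys_insert _ _ _ hnd)]
    rw [pv_merge_insert fn w c.items d hnd]

-- ===== VERDICT (by name: the statement is the Claim_ definition above) =====
theorem indexing_spec : Claim_equal_indexing := by
  intro index lyst file_name _
  show pvOfDict (List.foldl (pvAStep file_name) (pvToDict index) lyst)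
      = pvOfDict (List.foldl (pvBStep file_name) (pvToDict index)
          (List.foldl (fun c w => c.insert w (c.getD w 0 + 1)) PySem.Dict.empty lyst).items)
  rw [pv_main_fold file_name lyst PySem.Dict.empty (pvToDict index)
        (by simp [PySem.Dict.empty, PySem.Dict.keys])]
  rfl
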